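-- pv_equiv track=rewrite | github.com/thehalleyyoung/deppy | src/deppy/nl_synthesis/docstring_parser.py | _collect_indented_block
-- ===== SOURCE A (Python) =====
-- from typing import List, Optional, Tuple
--
-- def _collect_indented_block(lines: List[str], start: int) -> Tuple[str, int]:
--     collected: List[str] = []
--     i = start
--     while i < len(lines):
--         raw = lines[i]
--         if not raw.strip():
--             if collected:
--                 break
--             i += 1
--             continue
--         if raw.startswith(" ") or raw.startswith("\t"):
--             collected.append(raw.strip())
--             i += 1
--             continue
--         break
--     return " ".join(collected).strip(), i
-- ===== SOURCE B (Python) =====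
-- from typing import List, Tuple
--
-- def _collect_indented_block(lines: List[str], start: int) -> Tuple[str, int]:
--     n = len(lines)
--     if start >= n:
--         return "", start
--     # boundary search: first non-blank line, then first line ending the indented block
--     body = next((k for k in range(start, n) if lines[k].strip()), n)
--     end = next((k for k in range(body, n)
--                 if not lines[k].strip()
--                 or not (lines[k].startswith(" ") or lines[k].startswith("\t"))), n)
--     return " ".join(lines[k].strip() for k in range(body, end)).strip(), end
-- ===== Notes on version B (the rewrite author's own statement) =====
-- stated objective: alternative
-- what changed: Instead of A's stateful accumulation loop with a `collected` flag, B computes the two boundary indices (first non-blank line, first block-ending line) by searches over index ranges and then joins the stripped slice between them; no mutable accumulator or flag remains.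
import Mathlib
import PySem

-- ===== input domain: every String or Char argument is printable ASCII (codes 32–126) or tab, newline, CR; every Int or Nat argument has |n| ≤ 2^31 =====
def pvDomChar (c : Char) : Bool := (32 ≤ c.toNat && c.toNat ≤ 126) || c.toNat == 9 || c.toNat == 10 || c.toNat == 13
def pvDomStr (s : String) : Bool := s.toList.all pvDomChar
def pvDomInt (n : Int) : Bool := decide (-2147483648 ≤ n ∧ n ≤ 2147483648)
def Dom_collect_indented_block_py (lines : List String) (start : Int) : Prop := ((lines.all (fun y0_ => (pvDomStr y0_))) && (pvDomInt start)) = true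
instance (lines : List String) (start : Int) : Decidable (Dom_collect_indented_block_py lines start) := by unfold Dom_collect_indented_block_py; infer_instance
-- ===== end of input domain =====

-- B replaces A's stateful accumulation loop (with its `collected` flag) by two boundary
-- searches over index ranges followed by a join over the slice between them.

-- ===== PORT A =====
-- A's single while-loop: state = (collected, i); the three branches in source order.
-- fuel is only a structural-termination guard: the initial fuel (len(lines) - start).toNat
-- is never exhausted before the loop condition i < len(lines) fails.
def collectA (lines : List String) (fuel : Nat) (collected : List String) (i : Int) :
    String × Int :=
  match fuel with
  | 0 => (PySem.Str.strip (PySem.Str.join " " collected), i)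
  | fuel + 1 =>
    if i < (lines.length : Int) then
      match PySem.List.pyGet? lines i with
      | none =>
          -- IndexError in Python (excluded by Pre_); port stops here
          (PySem.Str.strip (PySem.Str.join " " collected), i)
      | some raw =>
          if PySem.Str.strip raw = "" then
            if collected ≠ [] then (PySem.Str.strip (PySem.Str.join " " collected), i)
            else collectA lines fuel collected (i + 1)
          else if PySem.Str.startswith raw " " || PySem.Str.startswith raw "\t" then
            collectA lines fuel (collected ++ [PySem.Str.strip raw]) (i + 1)
          else (PySem.Str.strip (PySem.Str.join " " collected), i)
    else (PySem.Str.strip (PySem.Str.join " " collected), i)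

def collect_indented_block_py (lines : List String) (start : Int) : String × Int :=
  collectA lines ((lines.length : Int) - start).toNat [] start

-- ===== PORT B =====
-- next((k for k in ks if p(lines[k])), d): first index in ks whose line satisfies p, else d.
def nextIdx (lines : List String) (p : String → Bool) (ks : List Int) (d : Int) : Int :=
  match ks with
  | [] => d
  | k :: rest =>
    match PySem.List.pyGet? lines k with
    | none => d   -- IndexError in Python (excluded by Pre_); unreachable under Pre_
    | some s => if p s then k else nextIdx lines p rest d

-- lines[k].strip() for the join (index valid under Pre_; default "" is unreachable there)
def stripAt (lines : List String) (k : Int) : String :=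
  PySem.Str.strip ((PySem.List.pyGet? lines k).getD "")

def collect_indented_block_py_alt (lines : List String) (start : Int) : String × Int :=
  let n : Int := lines.length
  if n ≤ start then ("", start)
  else
    let body := nextIdx lines (fun s => PySem.Str.strip s != "") (PySem.List.pyRange start n 1) n
    let stop := nextIdx lines
      (fun s => PySem.Str.strip s == "" ||
        !(PySem.Str.startswith s " " || PySem.Str.startswith s "\t"))
      (PySem.List.pyRange body n 1) n
    (PySem.Str.strip (PySem.Str.join " "
        ((PySem.List.pyRange body stop 1).map (stripAt lines))), stop)

-- ===== PRECONDITION & SPEC =====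
-- Pre_ excludes exactly the inputs where the Python programs raise IndexError: start below
-- -len(lines) while the scan is entered (start < len(lines)).
def Pre_collect_indented_block_py (lines : List String) (start : Int) : Prop :=
  start < (lines.length : Int) → -(lines.length : Int) ≤ start
instance (lines : List String) (start : Int) : Decidable (Pre_collect_indented_block_py lines start) := by unfold Pre_collect_indented_block_py; infer_instance

def pvWitness_collect_indented_block_py : List String × Int := (["  a", "  b", "c"], 0)

def Spec_collect_indented_block_py (lines : List String) (start : Int) (out : String × Int) : Prop := out = collect_indented_block_py_alt lines start
instance (lines : List String) (start : Int) (out : String × Int) : Decidable (Spec_collect_indented_block_py lines start out) := by unfold Spec_collect_indented_block_py; infer_instance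

-- ===== CLAIM (what is proved, stated in full; the proofs are below) =====
def Claim_equal_collect_indented_block_py : Prop := ∀ (lines : List String) (start : Int), Dom_collect_indented_block_py lines start → Pre_collect_indented_block_py lines start → Spec_collect_indented_block_py lines start (collect_indented_block_py lines start)

-- ===== LEMMAS AND PROOFS =====

-- proof-side intermediate forms of A's loop: skip phase and collect phase
def skipBlanks (lines : List String) (fuel : Nat) (i : Int) : Int :=
  match fuel with
  | 0 => i
  | fuel + 1 =>
    if i < (lines.length : Int) then
      match PySem.List.pyGet? lines i with
      | none => i
      | some raw => if PySem.Str.strip raw = "" then skipBlanks lines fuel (i + 1) else i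
    else i

def collectIndented (lines : List String) (fuel : Nat) (i : Int) : List String × Int :=
  match fuel with
  | 0 => ([], i)
  | fuel + 1 =>
    if i < (lines.length : Int) then
      match PySem.List.pyGet? lines i with
      | none => ([], i)
      | some raw =>
          if PySem.Str.strip raw ≠ "" ∧
             (PySem.Str.startswith raw " " || PySem.Str.startswith raw "\t") = true then
            let rest := collectIndented lines fuel (i + 1)
            (PySem.Str.strip raw :: rest.1, rest.2)
          else ([], i)
    else ([], i)

theorem skipBlanks_ge (lines : List String) (fuel : Nat) (i : Int) :
    i ≤ skipBlanks lines fuel i := by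
  induction fuel generalizing i with
  | zero => simp [skipBlanks]
  | succ f ih =>
    simp only [skipBlanks]
    by_cases h : i < (lines.length : Int)
    · rw [if_pos h]
      cases PySem.List.pyGet? lines i with
      | none => exact le_refl i
      | some raw =>
        dsimp only
        by_cases hb : PySem.Str.strip raw = ""
        · rw [if_pos hb]; exact le_trans (by omega) (ih (i + 1))
        · rw [if_neg hb]
    · rw [if_neg h]

theorem collectIndented_fuel_irrel (lines : List String) (f₁ f₂ : Nat) (i : Int)
    (h₁ : ((lines.length : Int) - i).toNat ≤ f₁) (h₂ : ((lines.length : Int) - i).toNat ≤ f₂) :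
    collectIndented lines f₁ i = collectIndented lines f₂ i := by
  induction f₁ generalizing f₂ i with
  | zero =>
    have hi : ¬ i < (lines.length : Int) := by omega
    cases f₂ with
    | zero => rfl
    | succ f => simp [collectIndented, hi]
  | succ f ih =>
    by_cases hi : i < (lines.length : Int)
    · cases f₂ with
      | zero => omega
      | succ f' =>
        simp only [collectIndented, if_pos hi]
        cases PySem.List.pyGet? lines i with
        | none => rfl
        | some raw =>
          dsimp only
          rw [ih (i := i + 1) (f₂ := f') (by omega) (by omega)]
    · cases f₂ with
      | zero => simp [collectIndented, hi]
      | succ f' => simp [collectIndented, hi]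

theorem collectA_collect_phase (lines : List String) (fuel : Nat) (c : List String) (i : Int)
    (hc : c ≠ []) (hf : ((lines.length : Int) - i).toNat ≤ fuel) :
    collectA lines fuel c i =
      (PySem.Str.strip (PySem.Str.join " " (c ++ (collectIndented lines fuel i).1)),
       (collectIndented lines fuel i).2) := by
  induction fuel generalizing c i with
  | zero => simp [collectA, collectIndented]
  | succ f ih =>
    by_cases h : i < (lines.length : Int)
    · simp only [collectA, collectIndented, if_pos h]
      cases PySem.List.pyGet? lines i with
      | none => simp only [List.append_nil]
      | some raw =>
        dsimp only
        by_cases hb : PySem.Str.strip raw = ""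
        · rw [if_pos hb, if_pos hc, if_neg (fun hcon => hcon.1 hb), List.append_nil]
        · rw [if_neg hb]
          by_cases hs : (PySem.Str.startswith raw " " || PySem.Str.startswith raw "\t") = true
          · rw [if_pos hs, if_pos (And.intro hb hs),
              ih (c ++ [PySem.Str.strip raw]) (i + 1) (by simp) (by omega)]
            simp only [List.append_assoc, List.singleton_append]
          · rw [if_neg hs, if_neg (fun hcon => hs hcon.2), List.append_nil]
    · simp only [collectA, collectIndented, if_neg h, List.append_nil]

theorem collectA_skip_phase (lines : List String) (fuel : Nat) (i : Int)
    (hf : ((lines.length : Int) - i).toNat ≤ fuel) :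
    collectA lines fuel [] i =
      (PySem.Str.strip
        (PySem.Str.join " " (collectIndented lines fuel (skipBlanks lines fuel i)).1),
       (collectIndented lines fuel (skipBlanks lines fuel i)).2) := by
  induction fuel generalizing i with
  | zero => simp [collectA, skipBlanks, collectIndented]
  | succ f ih =>
    by_cases h : i < (lines.length : Int)
    · cases hg : PySem.List.pyGet? lines i with
      | none =>
        simp only [collectA, skipBlanks, collectIndented, if_pos h, hg]
      | some raw =>
        by_cases hb : PySem.Str.strip raw = ""
        · have hskip : skipBlanks lines (f + 1) i = skipBlanks lines f (i + 1) := by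
            simp only [skipBlanks, if_pos h, hg, if_pos hb]
          have hj : i + 1 ≤ skipBlanks lines f (i + 1) := skipBlanks_ge lines f (i + 1)
          have hirr : collectIndented lines f (skipBlanks lines f (i + 1)) =
              collectIndented lines (f + 1) (skipBlanks lines f (i + 1)) :=
            collectIndented_fuel_irrel lines f (f + 1) _ (by omega) (by omega)
          have hA : collectA lines (f + 1) [] i = collectA lines f [] (i + 1) := by
            simp only [collectA, if_pos h, hg, if_pos hb,
              if_neg (fun hcon : ([] : List String) ≠ [] => hcon rfl)]
          rw [hA, ih (i + 1) (by omega), hskip, hirr]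
        · have hskip : skipBlanks lines (f + 1) i = i := by
            simp only [skipBlanks, if_pos h, hg, if_neg hb]
          rw [hskip]
          by_cases hs : (PySem.Str.startswith raw " " || PySem.Str.startswith raw "\t") = true
          · have hA : collectA lines (f + 1) [] i =
                collectA lines f [PySem.Str.strip raw] (i + 1) := by
              simp only [collectA, if_pos h, hg, if_neg hb, if_pos hs, List.nil_append]
            have hci : collectIndented lines (f + 1) i =
                (PySem.Str.strip raw :: (collectIndented lines f (i + 1)).1,
                 (collectIndented lines f (i + 1)).2) := by
              simp only [collectIndented, if_pos h, hg, if_pos (And.intro hb hs)]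
            rw [hA, collectA_collect_phase lines f [PySem.Str.strip raw] (i + 1)
              (by simp) (by omega), hci]
            simp only [List.singleton_append]
          · simp only [collectA, collectIndented, if_pos h, hg, if_neg hb, if_neg hs,
              if_neg (fun hcon : ¬ _ = "" ∧ _ => hs hcon.2)]
    · have hskip : skipBlanks lines (f + 1) i = i := by
        simp only [skipBlanks, if_neg h]
      rw [hskip]
      simp only [collectA, collectIndented, if_neg h]

-- nextIdx over range(a, b) with default b stays within [a, b]
-- the result of a nextIdx search is its default or a member of its index list
theorem nextIdx_cases (lines : List String) (p : String → Bool) (ks : List Int) (d : Int) :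
    nextIdx lines p ks d = d ∨ nextIdx lines p ks d ∈ ks := by
  induction ks with
  | nil => left; rfl
  | cons k rest ih =>
    simp only [nextIdx]
    cases PySem.List.pyGet? lines k with
    | none => left; rfl
    | some s =>
      dsimp only
      by_cases hp : p s = true
      · right; rw [if_pos hp]; exact List.mem_cons_self
      · rw [if_neg hp]
        rcases ih with h | h
        · left; exact h
        · right; exact List.mem_cons_of_mem _ h

-- nextIdx over range(a, b) with default b stays within [a, b]
theorem nextIdx_pyRange_ge (lines : List String) (p : String → Bool) (a b : Int)
    (hab : a ≤ b) : a ≤ nextIdx lines p (PySem.List.pyRange a b 1) b := by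
  rcases nextIdx_cases lines p (PySem.List.pyRange a b 1) b with h | h
  · omega
  · rw [PySem.List.mem_pyRange_one] at h; omega

theorem nextIdx_pyRange_le (lines : List String) (p : String → Bool) (a b : Int) :
    nextIdx lines p (PySem.List.pyRange a b 1) b ≤ b := by
  rcases nextIdx_cases lines p (PySem.List.pyRange a b 1) b with h | h
  · omega
  · rw [PySem.List.mem_pyRange_one] at h; omega

theorem pyGet?_isSome (lines : List String) (i : Int)
    (hlo : -(lines.length : Int) ≤ i) (hhi : i < (lines.length : Int)) :
    ∃ s, PySem.List.pyGet? lines i = some s := by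
  cases hg : PySem.List.pyGet? lines i with
  | none =>
    rw [PySem.List.pyGet?_eq_none_iff] at hg
    exact absurd ⟨hlo, hhi⟩ hg
  | some s => exact ⟨s, rfl⟩

-- A's skip phase computes B's first boundary index
theorem skipBlanks_eq_nextIdx (lines : List String) (fuel : Nat) (i : Int)
    (hlo : -(lines.length : Int) ≤ i) (hhi : i ≤ (lines.length : Int))
    (hf : ((lines.length : Int) - i).toNat ≤ fuel) :
    skipBlanks lines fuel i =
      nextIdx lines (fun s => PySem.Str.strip s != "")
        (PySem.List.pyRange i (lines.length : Int) 1) (lines.length : Int) := by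
  induction fuel generalizing i with
  | zero =>
    have : i = (lines.length : Int) := by omega
    rw [this, PySem.List.pyRange_one_eq_nil (le_refl _)]
    simp [skipBlanks, nextIdx]
  | succ f ih =>
    by_cases h : i < (lines.length : Int)
    · obtain ⟨s, hs⟩ := pyGet?_isSome lines i hlo h
      rw [PySem.List.pyRange_one_cons h]
      simp only [skipBlanks, nextIdx, if_pos h, hs]
      by_cases hb : PySem.Str.strip s = ""
      · rw [if_pos hb, if_neg (by simp [hb]), ih (i + 1) (by omega) (by omega) (by omega)]
      · rw [if_neg hb, if_pos (show (PySem.Str.strip s != "") = true by simp [hb])]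
    · have : i = (lines.length : Int) := by omega
      rw [this, PySem.List.pyRange_one_eq_nil (le_refl _)]
      simp [skipBlanks, nextIdx]

-- A's collect phase computes B's slice between the two boundary indices
theorem collectIndented_eq_slice (lines : List String) (fuel : Nat) (i : Int)
    (hlo : -(lines.length : Int) ≤ i) (hhi : i ≤ (lines.length : Int))
    (hf : ((lines.length : Int) - i).toNat ≤ fuel) :
    collectIndented lines fuel i =
      ((PySem.List.pyRange i
          (nextIdx lines (fun s => PySem.Str.strip s == "" ||
              !(PySem.Str.startswith s " " || PySem.Str.startswith s "\t"))
            (PySem.List.pyRange i (lines.length : Int) 1) (lines.length : Int)) 1).map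
          (stripAt lines),
       nextIdx lines (fun s => PySem.Str.strip s == "" ||
           !(PySem.Str.startswith s " " || PySem.Str.startswith s "\t"))
         (PySem.List.pyRange i (lines.length : Int) 1) (lines.length : Int)) := by
  induction fuel generalizing i with
  | zero =>
    have hi : i = (lines.length : Int) := by omega
    rw [hi, PySem.List.pyRange_one_eq_nil (le_refl _)]
    simp [collectIndented, nextIdx, PySem.List.pyRange_one_eq_nil (le_refl _)]
  | succ f ih =>
    by_cases h : i < (lines.length : Int)
    · obtain ⟨s, hs⟩ := pyGet?_isSome lines i hlo h
      rw [PySem.List.pyRange_one_cons h]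
      simp only [collectIndented, nextIdx, if_pos h, hs]
      by_cases hq : (PySem.Str.strip s == "" ||
          !(PySem.Str.startswith s " " || PySem.Str.startswith s "\t")) = true
      · have hcond : ¬ (PySem.Str.strip s ≠ "" ∧
            (PySem.Str.startswith s " " || PySem.Str.startswith s "\t") = true) := by
          rintro ⟨h1, h2⟩
          rw [h2] at hq
          simp at hq
          exact h1 hq
        rw [if_neg hcond, if_pos hq, PySem.List.pyRange_one_eq_nil (le_refl i)]
        simp
      · have hq' : (PySem.Str.strip s == "" ||
            !(PySem.Str.startswith s " " || PySem.Str.startswith s "\t")) = false := by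
          revert hq
          cases (PySem.Str.strip s == "" ||
            !(PySem.Str.startswith s " " || PySem.Str.startswith s "\t")) <;> simp
        have hb : PySem.Str.strip s ≠ "" := by
          intro hb0; simp [hb0] at hq'
        have hsw : (PySem.Str.startswith s " " || PySem.Str.startswith s "\t") = true := by
          cases hsw0 : (PySem.Str.startswith s " " || PySem.Str.startswith s "\t") with
          | true => rfl
          | false => rw [hsw0] at hq'; simp at hq'
        rw [if_pos ⟨hb, hsw⟩, if_neg hq,
          ih (i + 1) (by omega) (by omega) (by omega)]
        have hge : i + 1 ≤ nextIdx lines (fun s => PySem.Str.strip s == "" ||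
            !(PySem.Str.startswith s " " || PySem.Str.startswith s "\t"))
            (PySem.List.pyRange (i + 1) (lines.length : Int) 1) (lines.length : Int) :=
          nextIdx_pyRange_ge lines _ (i + 1) (lines.length : Int) (by omega)
        rw [PySem.List.pyRange_one_cons (by omega : i < _)]
        simp only [List.map_cons]
        have hsa : stripAt lines i = PySem.Str.strip s := by
          simp [stripAt, hs]
        rw [hsa]
    · have hi : i = (lines.length : Int) := by omega
      rw [hi, PySem.List.pyRange_one_eq_nil (le_refl _)]
      simp [collectIndented, nextIdx, PySem.List.pyRange_one_eq_nil (le_refl _)]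

-- ===== VERDICT (by name: the statement is the Claim_ definition above) =====
theorem collect_indented_block_py_spec : Claim_equal_collect_indented_block_py := by
  intro lines start _ hpre
  unfold Spec_collect_indented_block_py collect_indented_block_py collect_indented_block_py_alt
  by_cases hge : (lines.length : Int) ≤ start
  · have h0 : ((lines.length : Int) - start).toNat = 0 := by omega
    rw [h0, if_pos hge]
    simp [collectA]
    decide
  · have hlt : start < (lines.length : Int) := by omega
    have hlo : -(lines.length : Int) ≤ start := hpre hlt
    rw [if_neg hge]
    rw [collectA_skip_phase lines _ start (le_refl _)]
    rw [skipBlanks_eq_nextIdx lines _ start hlo (by omega) (le_refl _)]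
    set body := nextIdx lines (fun s => PySem.Str.strip s != "")
      (PySem.List.pyRange start (lines.length : Int) 1) (lines.length : Int) with hbody
    have hb1 : start ≤ body := nextIdx_pyRange_ge lines _ start _ (by omega)
    have hb2 : body ≤ (lines.length : Int) := nextIdx_pyRange_le lines _ start _
    rw [collectIndented_eq_slice lines _ body (by omega) hb2 (by omega)]
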